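-- pv_equiv track=rewrite | github.com/aureooms-research/meiser | learning/ksum.py | tuples
-- ===== SOURCE A (Python) =====
-- def tuples(k, n):
--     """
--         Yields the k-SUM hyperplanes coefficients for a k-SUM instance of size
--         n.
--
--         >>> list(tuples(2,3))
--         [(0, 1, 1), (1, 0, 1), (1, 1, 0)]
--
--         >>> from math import factorial
--         >>> binom = lambda n , k : factorial(n)/factorial(k)/factorial(n-k)
--         >>> len(list(tuples(4,10))) == binom(10,4)
--         True
--
--         >>> isinstance(next(tuples(2,3)), tuple)
--         True
--
--     """
--
--     if k > n:
--         return
--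
--     if k == 0:
--         yield (0,) * n
--         return
--
--     for h in tuples(k, n - 1):
--
--         yield (0,) + h
--
--     for h in tuples(k - 1, n - 1):
--
--         yield (1,) + h
-- ===== SOURCE B (Python) =====
-- def tuples(k, n):
--     # Bottom-up DP over the length: row[j] = all tuples of current length with j ones.
--     if k > n or k < 0:
--         return
--     rows = [[()]] + [[] for _ in range(k)]
--     for _ in range(n):
--         new = [[(0,) + t for t in rows[0]]]
--         for j in range(1, k + 1):
--             new.append([(0,) + t for t in rows[j]] + [(1,) + t for t in rows[j - 1]])
--         rows = new
--     yield from rows[k]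
-- ===== Notes on version B (the rewrite author's own statement) =====
-- stated objective: alternative
-- what changed: Replaces A's top-down double recursion (which recomputes overlapping subproblems along each recursion path) by a bottom-up dynamic program over the tuple length that keeps one row of lists per number of ones and builds each row once.
-- crash fix: For k < 0 with k <= n, A raises RecursionError (the recursion descends tuples(-j,-j) -> tuples(-j-1,-j-1) forever, never reaching k==0 or k>n); B returns the empty list there, the natural value since no 0/1 tuple has a negative number of ones. — e.g. on tuples(-1, 0): A raises RecursionError, B returns []
import Mathlib
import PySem

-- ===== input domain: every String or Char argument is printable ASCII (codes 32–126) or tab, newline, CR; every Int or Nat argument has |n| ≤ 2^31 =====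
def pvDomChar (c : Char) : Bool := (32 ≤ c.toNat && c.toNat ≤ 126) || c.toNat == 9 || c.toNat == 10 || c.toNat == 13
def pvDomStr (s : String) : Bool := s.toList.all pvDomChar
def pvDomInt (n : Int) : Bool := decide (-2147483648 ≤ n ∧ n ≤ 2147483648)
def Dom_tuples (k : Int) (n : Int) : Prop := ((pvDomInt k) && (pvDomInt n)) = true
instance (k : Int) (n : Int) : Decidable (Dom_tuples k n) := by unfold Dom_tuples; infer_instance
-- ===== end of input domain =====

-- B replaces A's top-down double recursion by a bottom-up DP over the tuple length
-- (one row of lists per count of ones, each row built once).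

-- ===== PORT A =====
-- 'if n ≤ 0 then []' is a totality guard only: that branch is reached only for k < 0
-- with k ≤ n, where the Python recursion raises RecursionError (verified by running A:
-- the call chain tuples(-j,-j) → tuples(-j-1,-j-1) never hits k == 0 or k > n) — those
-- inputs are outside Pre_tuples.
def tuples (k : Int) (n : Int) : List (List Int) :=
  if k > n then []
  else if k = 0 then [List.replicate n.toNat 0]
  else if n ≤ 0 then []
  else (tuples k (n - 1)).map (fun h => 0 :: h)
       ++ (tuples (k - 1) (n - 1)).map (fun h => 1 :: h)
termination_by n.toNat
decreasing_by all_goals omega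

-- ===== PORT B =====
-- one iteration of Source B's 'for _ in range(n)' loop body (the index is unused)
def tuplesStep (rows : List (List (List Int))) (_ : Nat) : List (List (List Int)) :=
  (rows.headD []).map (fun t => 0 :: t) ::
    (rows.zip rows.tail).map (fun p => p.2.map (fun t => 0 :: t) ++ p.1.map (fun t => 1 :: t))

def tuples_alt (k : Int) (n : Int) : List (List Int) :=
  if k > n ∨ k < 0 then []
  else ((List.range n.toNat).foldl tuplesStep ([[]] :: List.replicate k.toNat [])).getD k.toNat []

-- ===== PRECONDITION & SPEC =====
-- Pre_ excludes exactly the inputs on which A raises RecursionError: for k < 0 with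
-- k ≤ n the recursion descends tuples(-j,-j) → tuples(-j-1,-j-1) without ever reaching
-- a base case (k == 0 is never hit, and k > n never becomes true along that chain);
-- everywhere else A returns normally.
def Pre_tuples (k : Int) (n : Int) : Prop := 0 ≤ k ∨ n < k
instance (k : Int) (n : Int) : Decidable (Pre_tuples k n) := by unfold Pre_tuples; infer_instance
def pvWitness_tuples : Int × Int := (2, 3)

-- For k < 0 with k ≤ n, A raises RecursionError; B returns [], the natural value
-- since no 0/1 tuple has a negative number of ones (checkable claim: tuples_raises below).
def Raises_tuples (k : Int) (n : Int) : Prop := k < 0 ∧ k ≤ n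
instance (k : Int) (n : Int) : Decidable (Raises_tuples k n) := by unfold Raises_tuples; infer_instance
def pvRaiseWitness_tuples : Int × Int := (-1, 0)
def pvRaiseWitnessOut_tuples : List (List Int) := []

def Spec_tuples (k : Int) (n : Int) (out : List (List Int)) : Prop := out = tuples_alt k n
instance (k : Int) (n : Int) (out : List (List Int)) : Decidable (Spec_tuples k n out) := by unfold Spec_tuples; infer_instance

-- ===== CLAIM (what is proved, stated in full; the proofs are below) =====
def Claim_equal_tuples : Prop := ∀ (k : Int) (n : Int), Dom_tuples k n → Pre_tuples k n → Spec_tuples k n (tuples k n)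
def Claim_raises_tuples : Prop := (∀ (k : Int) (n : Int), Dom_tuples k n → Raises_tuples k n → ¬ Pre_tuples k n) ∧ (Dom_tuples (pvRaiseWitness_tuples.1) (pvRaiseWitness_tuples.2) ∧ Raises_tuples (pvRaiseWitness_tuples.1) (pvRaiseWitness_tuples.2) ∧ tuples_alt (pvRaiseWitness_tuples.1) (pvRaiseWitness_tuples.2) = pvRaiseWitnessOut_tuples)

-- ===== LEMMAS AND PROOFS =====

-- proof-only abbreviation: A's answers of length m, indexed by the number of ones
def arow (m : Nat) (j : Nat) : List (List Int) := tuples (j : Int) (m : Int)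

lemma tuples_of_gt {k n : Int} (h : n < k) : tuples k n = [] := by
  rw [tuples]; simp [show k > n from h]

lemma arow_zero (m : Nat) : arow m 0 = [List.replicate m 0] := by
  unfold arow
  rw [tuples]; simp

-- the recurrence of A for one more position, j ≥ 1
lemma arow_succ (j m : Nat) (hj : 1 ≤ j) :
    arow (m + 1) j
      = (arow m j).map (fun h => 0 :: h) ++ (arow m (j - 1)).map (fun h => 1 :: h) := by
  unfold arow
  by_cases hgt : ((m : Int) + 1 : Int) < ((j : Nat) : Int)
  · rw [show ((m + 1 : Nat) : Int) = (m : Int) + 1 by omega, tuples_of_gt hgt,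
      tuples_of_gt (by omega), tuples_of_gt (by omega)]
    simp
  · rw [show ((m + 1 : Nat) : Int) = (m : Int) + 1 by omega, tuples]
    have h1 : ¬ (((j : Nat) : Int) > (m : Int) + 1) := by omega
    have h2 : ¬ (((j : Nat) : Int) = 0) := by omega
    have h3 : ¬ ((m : Int) + 1 ≤ 0) := by omega
    simp only [h1, h2, h3, if_false]
    have h4 : ((j : Nat) : Int) - 1 = ((j - 1 : Nat) : Int) := by push_cast [hj]; ring
    rw [show (m : Int) + 1 - 1 = ((m : Nat) : Int) by ring, h4]

-- the initial row equals A's answers at length 0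
lemma row_base (K : Nat) :
    (List.range (K + 1)).map (arow 0) = [[]] :: List.replicate K [] := by
  induction K with
  | zero => simp [arow_zero 0]
  | succ K ih =>
      rw [List.range_succ, List.map_append, ih]
      have h : arow 0 (K + 1) = [] := by
        unfold arow; apply tuples_of_gt; push_cast; omega
      simp [h, List.replicate_succ']

-- one DP step maps A's answers at length m to A's answers at length m+1
lemma row_step (K m : Nat) (i : Nat) :
    tuplesStep ((List.range (K + 1)).map (arow m)) i
      = (List.range (K + 1)).map (arow (m + 1)) := by
  unfold tuplesStep
  apply List.ext_getElem
  · simp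
  · intro idx h1 h2
    match idx with
    | 0 =>
        have hhead : ((List.range (K + 1)).map (arow m)).headD [] = arow m 0 := by
          rw [List.range_succ_eq_map]; simp
        simp only [List.getElem_cons_zero, List.getElem_map, List.getElem_range, hhead]
        rw [arow_zero m, arow_zero (m + 1)]
        simp [List.replicate_succ]
    | idx + 1 =>
        simp only [List.getElem_cons_succ, List.getElem_map, List.getElem_zip,
          List.getElem_tail, List.getElem_range]
        rw [arow_succ (idx + 1) m (by omega)]
        simp

-- loop invariant: after m iterations the rows are A's answers at length m
lemma row_inv (K m : Nat) :
    (List.range m).foldl tuplesStep ([[]] :: List.replicate K [])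
      = (List.range (K + 1)).map (arow m) := by
  induction m with
  | zero => simpa using (row_base K).symm
  | succ m ih =>
      rw [List.range_succ, List.foldl_append, ih, List.foldl_cons, List.foldl_nil,
        row_step K m m]

-- ===== VERDICT (by name: the statements are the Claim_ definitions above) =====
theorem tuples_raises : Claim_raises_tuples := by
  unfold Claim_raises_tuples
  exact ⟨by intro k n _ hr; unfold Pre_tuples; unfold Raises_tuples at hr; omega, by decide⟩

theorem tuples_spec : Claim_equal_tuples := by
  intro k n hdom hpre
  unfold Spec_tuples tuples_alt
  by_cases h : k > n ∨ k < 0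
  · -- Pre_ excludes the raising region (tuples_raises.1), so here k > n
    have hnr : ¬ Raises_tuples k n := fun hr => tuples_raises.1 k n hdom hr hpre
    have hkn : k > n := by unfold Raises_tuples at hnr; omega
    rw [tuples_of_gt hkn]
    simp [h]
  · have hkn : k ≤ n := by omega
    have hk0 : 0 ≤ k := by omega
    have hn0 : 0 ≤ n := le_trans hk0 hkn
    rw [if_neg h, row_inv k.toNat n.toNat]
    have hget : ((List.range (k.toNat + 1)).map (arow n.toNat)).getD k.toNat []
        = arow n.toNat k.toNat := by
      rw [List.getD_eq_getElem?_getD]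
      simp
    rw [hget]
    unfold arow
    rw [Int.toNat_of_nonneg hk0, Int.toNat_of_nonneg hn0]
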